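-- pv_equiv track=rewrite | github.com/kunhee94/swea | 정리/수업/stack/4873.py | del_str
-- ===== SOURCE A (Python) =====
-- def del_str(str):
--     # 문자열은 변경불가능하니 리스트로 형변환
--     target_str = list(str)
--     for i in range(len(target_str)-1):
--         # 만약 연속으로 나오면 그거 2개 지우고 바로 다시 재귀돌아야하니까
--         if target_str[i] == target_str[i+1]:
--             del target_str[i+1]
--             del target_str[i]
--             # 다시 문자열로 바꾸고 재귀에 넣어줌
--             return del_str(''.join(target_str))
--         # 끝까지 돌았는데 이제 연속이 없으면 길이 출력
--     return len(target_str)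
-- ===== SOURCE B (Python) =====
-- def del_str(str):
--     stack = []
--     for ch in str:
--         if stack and stack[-1] == ch:
--             stack.pop()
--         else:
--             stack.append(ch)
--     return len(stack)
-- ===== Notes on version B (the rewrite author's own statement) =====
-- stated objective: faster
-- what changed: Replaced repeated restart-from-scratch recursion (rescan + rebuild the string after each pair removal) with a single-pass stack that pops on a match with the top and pushes otherwise, returning the stack size.
import Mathlib
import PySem

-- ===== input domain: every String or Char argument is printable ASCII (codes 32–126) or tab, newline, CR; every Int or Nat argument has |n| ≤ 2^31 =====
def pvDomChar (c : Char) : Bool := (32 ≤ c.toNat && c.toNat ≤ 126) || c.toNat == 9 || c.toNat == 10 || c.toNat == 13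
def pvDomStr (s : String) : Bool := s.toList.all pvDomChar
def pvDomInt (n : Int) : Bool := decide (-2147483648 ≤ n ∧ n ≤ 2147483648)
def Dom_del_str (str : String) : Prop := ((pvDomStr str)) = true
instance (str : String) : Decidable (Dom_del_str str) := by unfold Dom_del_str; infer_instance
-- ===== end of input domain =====

-- B replaces A's restart-from-scratch pair-removal recursion with a single-pass stack; faster (asymptotic, measured).

-- ===== PORT A =====
-- A's for-loop scans for the first adjacent equal pair; on a hit it deletes both
-- characters and recurses on the rejoined string. scanDelA is that scan: it returns
-- the list with the first adjacent equal pair deleted, or none when the loop finishes.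
def scanDelA : List Char → Option (List Char)
  | a :: b :: t => if a == b then some t else (scanDelA (b :: t)).map (a :: ·)
  | _ => none

theorem scanDelA_length : ∀ (l l' : List Char), scanDelA l = some l' → l'.length + 2 = l.length := by
  intro l
  induction l with
  | nil => intro l' h; simp [scanDelA] at h
  | cons a t ih =>
    intro l' h
    match t, h with
    | b :: t, h =>
      simp only [scanDelA] at h
      split at h
      · cases h; simp
      · simp only [Option.map_eq_some_iff] at h
        obtain ⟨m, hm, rfl⟩ := h
        have := ih m hm
        simp at this ⊢
        omega

def del_str (str : String) : Int :=
  match h : scanDelA str.toList with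
  | some l => del_str (String.ofList l)
  | none => (str.toList.length : Int)
termination_by str.toList.length
decreasing_by
  have := scanDelA_length str.toList l h
  simp only [String.toList_ofList] at *
  omega

-- ===== PORT B =====
-- one step of B's loop body: pop on a match with the top, else push
def stepB (stk : List Char) (c : Char) : List Char :=
  match stk with
  | t :: r => if t == c then r else c :: t :: r
  | [] => [c]

def del_str_alt (str : String) : Int :=
  ((str.toList.foldl stepB []).length : Int)

-- ===== PRECONDITION & SPEC =====
def Spec_del_str (str : String) (out : Int) : Prop := out = del_str_alt str
instance (str : String) (out : Int) : Decidable (Spec_del_str str out) := by unfold Spec_del_str; infer_instance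

-- ===== CLAIM (what is proved, stated in full; the proofs are below) =====
def Claim_equal_del_str : Prop := ∀ (str : String), Dom_del_str str → Spec_del_str str (del_str str)

-- ===== LEMMAS AND PROOFS =====

-- the stack never holds two adjacent equal characters
theorem stepB_chain {stk : List Char} (h : List.IsChain (· ≠ ·) stk) (c : Char) :
    List.IsChain (· ≠ ·) (stepB stk c) := by
  match stk with
  | [] => simp [stepB]
  | t :: r =>
    simp only [stepB]
    split
    · exact h.tail
    · rename_i hne
      have htc : t ≠ c := by simpa using hne
      exact List.isChain_cons_cons.mpr ⟨htc.symm, h⟩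

-- deleting an adjacent equal pair at the front does not change B's run
theorem foldl_stepB_pair {stk : List Char} (h : List.IsChain (· ≠ ·) stk) (c : Char) (ys : List Char) :
    (c :: c :: ys).foldl stepB stk = ys.foldl stepB stk := by
  match stk with
  | [] => simp [stepB]
  | t :: r =>
    by_cases htc : t = c
    · subst htc
      match r with
      | [] => simp [stepB]
      | h2 :: r2 =>
        have hne : t ≠ h2 := List.rel_of_isChain_cons_cons h
        simp [stepB, Ne.symm hne]
    · simp [stepB, htc]

-- deleting an adjacent equal pair anywhere does not change B's run
theorem foldl_stepB_del (xs : List Char) : ∀ (stk : List Char), List.IsChain (· ≠ ·) stk →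
    ∀ (c : Char) (ys : List Char),
    (xs ++ c :: c :: ys).foldl stepB stk = (xs ++ ys).foldl stepB stk := by
  induction xs with
  | nil => intro stk h c ys; simpa using foldl_stepB_pair h c ys
  | cons a xs ih =>
    intro stk h c ys
    simp only [List.cons_append, List.foldl_cons]
    exact ih (stepB stk a) (stepB_chain h a) c ys

-- A's scan decomposes the list around the deleted pair
theorem scanDelA_some : ∀ (l l' : List Char), scanDelA l = some l' →
    ∃ xs c ys, l = xs ++ c :: c :: ys ∧ l' = xs ++ ys := by
  intro l
  induction l with
  | nil => intro l' h; simp [scanDelA] at h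
  | cons a t ih =>
    intro l' h
    match t, h with
    | b :: t, h =>
      simp only [scanDelA] at h
      split at h
      · injection h with h'
        subst h'
        rename_i hab
        exact ⟨[], a, t, by simp [beq_iff_eq.mp hab], rfl⟩
      · simp only [Option.map_eq_some_iff] at h
        obtain ⟨m, hm, rfl⟩ := h
        obtain ⟨xs, c, ys, h1, h2⟩ := ih m hm
        exact ⟨a :: xs, c, ys, by simp [h1], by simp [h2]⟩

-- when A's scan finds nothing, the list has no adjacent equal characters
theorem scanDelA_none : ∀ (l : List Char), scanDelA l = none → List.IsChain (· ≠ ·) l := by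
  intro l
  induction l with
  | nil => intro _; exact List.IsChain.nil
  | cons a t ih =>
    intro h
    match t with
    | [] => exact List.isChain_singleton a
    | b :: t =>
      simp only [scanDelA] at h
      split at h
      · cases h
      · simp only [Option.map_eq_none_iff] at h
        rename_i hab
        exact List.isChain_cons_cons.mpr ⟨by simpa using hab, ih h⟩

-- on a pair-free list B's stack just accumulates everything
theorem foldl_stepB_noadj : ∀ (l stk : List Char), List.IsChain (· ≠ ·) l →
    (∀ a r t s, l = a :: r → stk = t :: s → t ≠ a) →
    l.foldl stepB stk = l.reverse ++ stk := by
  intro l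
  induction l with
  | nil => simp
  | cons a r ih =>
    intro stk hc hne
    have hstep : stepB stk a = a :: stk := by
      match stk with
      | [] => rfl
      | t :: s =>
        have := hne a r t s rfl rfl
        simp [stepB, this]
    simp only [List.foldl_cons, hstep]
    rw [ih (a :: stk) hc.tail]
    · simp
    · intro a' r' t s h1 h2
      cases h2
      subst h1
      exact List.rel_of_isChain_cons_cons hc

-- main: A equals B on every string
theorem del_str_eq (str : String) : del_str str = del_str_alt str := by
  unfold del_str
  split
  · rename_i l h
    have hrec := del_str_eq (String.ofList l)
    obtain ⟨xs, c, ys, h1, h2⟩ := scanDelA_some _ _ h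
    rw [hrec]
    unfold del_str_alt
    rw [String.toList_ofList, h1, h2, foldl_stepB_del xs [] (by simp) c ys]
  · rename_i h
    have hc := scanDelA_none _ h
    unfold del_str_alt
    rw [foldl_stepB_noadj _ [] hc (by intro _ _ _ _ _ hs; cases hs)]
    simp
termination_by str.toList.length
decreasing_by
  rename_i h
  have := scanDelA_length _ _ h
  simp only [String.toList_ofList] at *
  omega

-- ===== VERDICT (by name: the statement is the Claim_ definition above) =====
theorem del_str_spec : Claim_equal_del_str := by
  intro str _
  exact del_str_eq str
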